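-- pv_equiv track=rewrite | github.com/Auceane/BUTinfo1_SAE_1.02-Comparaison_d.approches_algorithmiques | Partie 1/biology.py | tabl
-- ===== SOURCE A (Python) =====
-- def tabl(c):
--     """
--     Cette fonction produit le tableau des possibilités de combinaison possible en 3 caractères.
--     """
--     t=[]
--     i=0
--
--     while i<4:
--         ch=c[i]
--         j=0
--         while j<4:
--             cha=ch+c[j]
--             k=0
--             while k<4:
--                 char=cha+c[k]
--                 t.append(char)
--                 k+=1
--             j+=1
--         i+=1
--     return t
-- ===== SOURCE B (Python) =====
-- def tabl(c):
--     """
--     Cette fonction produit le tableau des possibilités de combinaison possible en 3 caractères.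
--     """
--     prefixes = [c[0], c[1], c[2], c[3]]
--     for _ in range(2):
--         prefixes = [p + c[j] for p in prefixes for j in range(4)]
--     return prefixes
-- ===== Notes on version B (the rewrite author's own statement) =====
-- stated objective: simpler
-- what changed: Replaces the three hand-indexed nested while loops with iterative prefix extension: seed with the four single characters, then twice extend every prefix by each of the four characters via a flat comprehension.
import Mathlib
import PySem

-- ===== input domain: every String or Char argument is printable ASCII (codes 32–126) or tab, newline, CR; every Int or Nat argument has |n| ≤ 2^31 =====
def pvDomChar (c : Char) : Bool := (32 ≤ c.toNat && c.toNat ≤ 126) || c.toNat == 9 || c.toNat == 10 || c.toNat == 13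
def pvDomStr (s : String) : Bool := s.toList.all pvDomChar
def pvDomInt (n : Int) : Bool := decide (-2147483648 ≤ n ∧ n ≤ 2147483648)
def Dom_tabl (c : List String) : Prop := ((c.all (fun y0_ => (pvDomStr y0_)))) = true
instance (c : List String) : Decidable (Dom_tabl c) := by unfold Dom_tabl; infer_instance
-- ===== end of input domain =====

-- B replaces the three nested while loops by iterative prefix extension (simpler decomposition); same values.

-- ===== PORT A =====
-- literal port of A's three nested while loops over i,j,k < 4, indexing c[i]; pyGet? is
-- IndexError-exact, Pre_ excludes the error case, so getD "" is never reached inside Pre_.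
def tabl (c : List String) : List String :=
  (PySem.List.pyRange 0 4 1).foldl (fun t i =>
    let ch := (PySem.List.pyGet? c i).getD ""
    (PySem.List.pyRange 0 4 1).foldl (fun t j =>
      let cha := ch ++ (PySem.List.pyGet? c j).getD ""
      (PySem.List.pyRange 0 4 1).foldl (fun t k =>
        t ++ [cha ++ (PySem.List.pyGet? c k).getD ""]) t) t) []

-- ===== PORT B =====
-- literal port of B: seed the four single-character prefixes, then two extension passes.
def tablAltExtend (c : List String) (ps : List String) : List String :=
  ps.flatMap (fun p => (PySem.List.pyRange 0 4 1).map (fun j => p ++ (PySem.List.pyGet? c j).getD ""))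

def tabl_alt (c : List String) : List String :=
  let seed := [(PySem.List.pyGet? c 0).getD "", (PySem.List.pyGet? c 1).getD "",
               (PySem.List.pyGet? c 2).getD "", (PySem.List.pyGet? c 3).getD ""]
  (List.range 2).foldl (fun ps _ => tablAltExtend c ps) seed

-- ===== PRECONDITION & SPEC =====
-- Pre_: Python A raises IndexError when len(c) < 4.
def Pre_tabl (c : List String) : Prop := 4 ≤ c.length
instance (c : List String) : Decidable (Pre_tabl c) := by unfold Pre_tabl; infer_instance
def pvWitness_tabl : List String := ["a", "b", "c", "d"]
def Spec_tabl (c : List String) (out : List String) : Prop := out = tabl_alt c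
instance (c : List String) (out : List String) : Decidable (Spec_tabl c out) := by unfold Spec_tabl; infer_instance

-- ===== CLAIM (what is proved, stated in full; the proofs are below) =====
def Claim_equal_tabl : Prop := ∀ (c : List String), Dom_tabl c → Pre_tabl c → Spec_tabl c (tabl c)

-- ===== LEMMAS AND PROOFS =====

-- ===== VERDICT (by name: the statement is the Claim_ definition above) =====
theorem tabl_spec : Claim_equal_tabl := by
  intro c _ _
  unfold Spec_tabl tabl tabl_alt tablAltExtend
  have h4 : PySem.List.pyRange 0 4 1 = [0, 1, 2, 3] := by decide
  have h2 : List.range 2 = [0, 1] := by decide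
  rw [h4, h2]
  simp
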